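-- pv_equiv track=rewrite | github.com/heosangmin/practiceAlgorithm | codesignal.com/Arcade/cs_10_commonCharacterCount.py | solution
-- ===== SOURCE A (Python) =====
-- def solution(s1, s2):
--     c1 = {}
--     c2 = {}
--     result = 0
--
--     for c in s1:
--         if c in c1:
--             c1[c] += 1
--         else:
--             c1[c] = 1
--
--     for c in s2:
--         if c in c2:
--             c2[c] += 1
--         else:
--             c2[c] = 1
--
--     for key in c1:
--         if key in c2:
--             result += min(c1[key], c2[key])
--
--     return result
-- ===== SOURCE B (Python) =====
-- def solution(s1, s2):
--     a = sorted(s1)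
--     b = sorted(s2)
--     i = j = 0
--     result = 0
--     while i < len(a) and j < len(b):
--         if a[i] < b[j]:
--             i += 1
--         elif a[i] > b[j]:
--             j += 1
--         else:
--             result += 1
--             i += 1
--             j += 1
--     return result
-- ===== Notes on version B (the rewrite author's own statement) =====
-- stated objective: alternative
-- what changed: replaces the two frequency dictionaries and key-intersection loop with sorting both strings and counting matches in a single two-pointer merge scan
import Mathlib
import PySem

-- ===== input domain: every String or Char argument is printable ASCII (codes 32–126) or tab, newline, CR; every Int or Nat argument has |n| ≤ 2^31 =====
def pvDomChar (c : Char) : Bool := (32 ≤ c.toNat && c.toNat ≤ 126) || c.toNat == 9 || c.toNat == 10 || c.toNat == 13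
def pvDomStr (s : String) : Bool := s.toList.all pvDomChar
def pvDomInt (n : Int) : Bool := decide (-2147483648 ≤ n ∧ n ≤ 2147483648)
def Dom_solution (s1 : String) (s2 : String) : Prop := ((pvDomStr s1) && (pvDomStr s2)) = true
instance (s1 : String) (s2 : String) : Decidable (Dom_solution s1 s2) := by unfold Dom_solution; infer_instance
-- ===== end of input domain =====

-- B replaces A's two frequency dictionaries + key-intersection loop by sorting both
-- strings and counting matches with a two-pointer merge scan (alternative algorithm).

-- ===== PORT A =====
def solution (s1 : String) (s2 : String) : Int :=
  let c1 := s1.toList.foldl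
    (fun d c => if d.contains c then d.insert c (d.getD c 0 + 1) else d.insert c 1)
    (PySem.Dict.empty : PySem.Dict Char Int)
  let c2 := s2.toList.foldl
    (fun d c => if d.contains c then d.insert c (d.getD c 0 + 1) else d.insert c 1)
    (PySem.Dict.empty : PySem.Dict Char Int)
  c1.keys.foldl
    (fun r k => if c2.contains k then r + min (c1.getD k 0) (c2.getD k 0) else r) 0

-- ===== PORT B =====
-- the while loop of Source B: two indices into the sorted lists, realised as the
-- structural recursion on the two list suffixes
def mergeCount : List Char → List Char → Int
  | x :: xs, y :: ys =>
      if x < y then mergeCount xs (y :: ys)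
      else if y < x then mergeCount (x :: xs) ys
      else 1 + mergeCount xs ys
  | _, _ => 0
termination_by a b => a.length + b.length

def solution_alt (s1 : String) (s2 : String) : Int :=
  mergeCount (PySem.List.sorted s1.toList (fun c => c) false)
             (PySem.List.sorted s2.toList (fun c => c) false)

-- ===== PRECONDITION & SPEC =====
def Spec_solution (s1 : String) (s2 : String) (out : Int) : Prop := out = solution_alt s1 s2
instance (s1 : String) (s2 : String) (out : Int) : Decidable (Spec_solution s1 s2 out) := by unfold Spec_solution; infer_instance

-- ===== CLAIM (what is proved, stated in full; the proofs are below) =====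
def Claim_equal_solution : Prop := ∀ (s1 : String) (s2 : String), Dom_solution s1 s2 → Spec_solution s1 s2 (solution s1 s2)

-- ===== LEMMAS AND PROOFS =====

-- the common value: the size of the multiset intersection of the two character lists
-- B's merge scan on two sorted lists computes the multiset-intersection size
lemma mergeCount_card (n : Nat) : ∀ (a b : List Char), a.length + b.length ≤ n →
    a.Pairwise (· ≤ ·) → b.Pairwise (· ≤ ·) →
    mergeCount a b = (((a : Multiset Char) ∩ (b : Multiset Char)).card : Int) := by
  induction n with
  | zero =>
    intro a b h _ _
    match a, b with
    | [], [] => simp [mergeCount]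
    | [], _ :: _ => simp at h
    | _ :: _, _ => simp at h
  | succ n ih =>
    intro a b h ha hb
    match a, b with
    | [], b => simp [mergeCount]
    | x :: xs, [] => simp [mergeCount]
    | x :: xs, y :: ys =>
      rcases lt_trichotomy x y with hlt | heq | hgt
      · rw [mergeCount, if_pos hlt]
        have hx : ¬ x = y ∧ x ∉ ys := by
          constructor
          · intro hxy; exact lt_irrefl x (hxy ▸ hlt)
          · intro hm
            exact absurd (((List.pairwise_cons.1 hb).1 x hm).trans_lt' hlt) (lt_irrefl x)
        have hcard : ((x :: xs : Multiset Char) ∩ (y :: ys : Multiset Char))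
            = ((xs : Multiset Char) ∩ (y :: ys : Multiset Char)) := by
          ext c
          simp only [Multiset.count_inter, ← Multiset.cons_coe, Multiset.count_cons,
            Multiset.coe_count]
          by_cases hc : c = x
          · subst hc
            simp [hx.1, List.count_eq_zero.2 hx.2]
          · simp [hc]
        rw [hcard]
        exact ih xs (y :: ys) (by simp at h ⊢; omega) (List.pairwise_cons.1 ha).2 hb
      · subst heq
        rw [mergeCount, if_neg (lt_irrefl x), if_neg (lt_irrefl x)]
        have hcard : ((x :: xs : Multiset Char) ∩ (x :: ys : Multiset Char))
            = x ::ₘ ((xs : Multiset Char) ∩ (ys : Multiset Char)) := by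
          ext c
          simp only [Multiset.count_inter, ← Multiset.cons_coe, Multiset.count_cons,
            Multiset.coe_count]
          by_cases hc : c = x <;> simp [hc]
        rw [hcard, Multiset.card_cons,
          ih xs ys (by simp at h ⊢; omega) (List.pairwise_cons.1 ha).2
            (List.pairwise_cons.1 hb).2]
        push_cast
        ring
      · rw [mergeCount, if_neg (not_lt.2 hgt.le), if_pos hgt]
        have hy : ¬ y = x ∧ y ∉ xs := by
          constructor
          · intro hyx; exact lt_irrefl y (hyx ▸ hgt)
          · intro hm
            exact absurd (((List.pairwise_cons.1 ha).1 y hm).trans_lt' hgt) (lt_irrefl y)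
        have hcard : ((x :: xs : Multiset Char) ∩ (y :: ys : Multiset Char))
            = ((x :: xs : Multiset Char) ∩ (ys : Multiset Char)) := by
          ext c
          simp only [Multiset.count_inter, ← Multiset.cons_coe, Multiset.count_cons,
            Multiset.coe_count]
          by_cases hc : c = y
          · subst hc
            simp [hy.1, List.count_eq_zero.2 hy.2]
          · simp [hc]
        rw [hcard]
        exact ih (x :: xs) ys (by simp at h ⊢; omega) ha (List.pairwise_cons.1 hb).2

-- A's counting loop (membership test + insert) is collections.Counter
lemma fold_eq_counter (l : List Char) :
    l.foldl (fun d c => if d.contains c then d.insert c (d.getD c 0 + 1) else d.insert c 1)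
      (PySem.Dict.empty : PySem.Dict Char Int) = PySem.Dict.counter l := by
  have hf : (fun (d : PySem.Dict Char Int) c =>
      if d.contains c then d.insert c (d.getD c 0 + 1) else d.insert c 1)
      = fun d x => d.insert x (d.getD x 0 + 1) := by
    funext d c
    by_cases hc : d.contains c
    · simp [hc]
    · simp only [Bool.not_eq_true] at hc
      have h0 : d.getD c 0 = 0 := by
        simp [PySem.Dict.getD_of_not_contains, hc]
      simp [hc, h0]
  rw [hf, PySem.Dict.foldl_insert_getD_add_one_eq_counter]

-- A's key-intersection loop computes the multiset-intersection size
lemma sum_min_eq_card (l1 l2 : List Char) :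
    ((PySem.Set.ofList l1).map
        (fun k => if (PySem.Dict.counter l2).contains k
                  then min ((l1.count k : Int)) ((l2.count k : Int)) else 0)).sum
      = (((l1 : Multiset Char) ∩ (l2 : Multiset Char)).card : Int) := by
  have hterm : ∀ k, (if (PySem.Dict.counter l2).contains k
        then min ((l1.count k : Int)) ((l2.count k : Int)) else 0)
      = ((min (l1.count k) (l2.count k) : Nat) : Int) := by
    intro k
    by_cases hk : k ∈ l2
    · simp [PySem.Dict.contains_counter, hk, Nat.cast_min]
    · have : l2.count k = 0 := List.count_eq_zero.2 hk
      simp [PySem.Dict.contains_counter, hk, this]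
  rw [List.map_congr_left (fun k _ => hterm k)]
  rw [← List.sum_toFinset _ (PySem.Set.nodup_ofList l1)]
  have hfs : (PySem.Set.ofList l1).toFinset = l1.toFinset := by
    ext c; simp [PySem.Set.mem_ofList]
  rw [hfs]
  rw [← Nat.cast_sum]
  congr 1
  have hsub : ((l1 : Multiset Char) ∩ (l2 : Multiset Char)).toFinset ⊆ l1.toFinset := by
    intro c hc
    simp only [Multiset.mem_toFinset, Multiset.mem_inter, Multiset.mem_coe] at hc
    simpa using hc.1
  rw [← Multiset.toFinset_sum_count_eq ((l1 : Multiset Char) ∩ (l2 : Multiset Char))]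
  rw [Finset.sum_subset hsub]
  · apply Finset.sum_congr rfl
    intro c _
    simp
  · intro c hc hnc
    simp only [Multiset.mem_toFinset, Multiset.mem_inter, Multiset.mem_coe,
      List.mem_toFinset, not_and] at hc hnc
    simp only [Multiset.count_inter, Multiset.coe_count]
    have : l2.count c = 0 := List.count_eq_zero.2 (hnc hc)
    omega

lemma solution_eq_card (s1 s2 : String) :
    solution s1 s2 = (((s1.toList : Multiset Char) ∩ (s2.toList : Multiset Char)).card : Int) := by
  have hA : solution s1 s2 = (PySem.Dict.counter s1.toList).keys.foldl
      (fun r k => if (PySem.Dict.counter s2.toList).contains k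
        then r + min ((PySem.Dict.counter s1.toList).getD k 0)
            ((PySem.Dict.counter s2.toList).getD k 0) else r) 0 := by
    unfold solution
    rw [fold_eq_counter, fold_eq_counter]
  have hstep : (fun (r : Int) k => if (PySem.Dict.counter s2.toList).contains k
        then r + min ((PySem.Dict.counter s1.toList).getD k 0)
            ((PySem.Dict.counter s2.toList).getD k 0) else r)
      = fun r k => r + (if (PySem.Dict.counter s2.toList).contains k
        then min ((s1.toList.count k : Int)) ((s2.toList.count k : Int)) else 0) := by
    funext r k
    by_cases hk : (PySem.Dict.counter s2.toList).contains k <;>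
      simp [hk, PySem.Dict.getD_counter]
  rw [hA, hstep, PySem.Dict.keys_counter, PySem.List.foldl_add, zero_add]
  exact sum_min_eq_card s1.toList s2.toList

-- ===== VERDICT (by name: the statement is the Claim_ definition above) =====
theorem solution_spec : Claim_equal_solution := by
  intro s1 s2 _
  unfold Spec_solution solution_alt
  rw [solution_eq_card,
    mergeCount_card (s1.toList.length + s2.toList.length) _ _
      (by simp [PySem.List.length_sorted])
      (PySem.List.sorted_pairwise s1.toList (fun c => c))
      (PySem.List.sorted_pairwise s2.toList (fun c => c))]
  congr 1
  rw [Multiset.coe_eq_coe.2 (PySem.List.sorted_perm s1.toList (fun c => c) false),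
      Multiset.coe_eq_coe.2 (PySem.List.sorted_perm s2.toList (fun c => c) false)]
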